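-- pv_equiv track=rewrite | github.com/rinward23/AstroEngine | scripts/generate_requirements.py | canonical_name
-- ===== SOURCE A (Python) =====
-- def canonical_name(spec: str) -> str:
--     spec = spec.split(";", 1)[0]
--     spec = spec.split("[", 1)[0]
--     for token in ("==", "!=", ">=", "<=", "~=", ">", "<"):
--         if token in spec:
--             spec = spec.split(token, 1)[0]
--             break
--     return spec.strip().lower().replace("-", "_")
-- ===== SOURCE B (Python) =====
-- def canonical_name(spec: str) -> str:
--     # single char scan replaces the two sequential splits on ";" and "["
--     name = []
--     for c in spec:
--         if c == ";" or c == "[":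
--             break
--         name.append(c)
--     s = "".join(name)
--     # first token (in priority order) located with find, then one slice
--     cut = len(s)
--     for t in ("==", "!=", ">=", "<=", "~=", ">", "<"):
--         p = s.find(t)
--         if p != -1:
--             cut = p
--             break
--     s = s[:cut].strip()
--     # lower-case and dash->underscore fused into one per-char pass
--     return "".join("_" if c == "-" else c.lower() for c in s)
-- ===== Notes on version B (the rewrite author's own statement) =====
-- stated objective: alternative
-- what changed: B replaces A's two sequential maxsplit-1 splits with a single character scan that stops at the first environment-marker or extras delimiter, replaces the membership-test-plus-split operator loop with a find-then-one-slice priority scan, and fuses A's lower and dash-replacement passes into one per-char translation pass after the strip.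
import Mathlib
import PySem

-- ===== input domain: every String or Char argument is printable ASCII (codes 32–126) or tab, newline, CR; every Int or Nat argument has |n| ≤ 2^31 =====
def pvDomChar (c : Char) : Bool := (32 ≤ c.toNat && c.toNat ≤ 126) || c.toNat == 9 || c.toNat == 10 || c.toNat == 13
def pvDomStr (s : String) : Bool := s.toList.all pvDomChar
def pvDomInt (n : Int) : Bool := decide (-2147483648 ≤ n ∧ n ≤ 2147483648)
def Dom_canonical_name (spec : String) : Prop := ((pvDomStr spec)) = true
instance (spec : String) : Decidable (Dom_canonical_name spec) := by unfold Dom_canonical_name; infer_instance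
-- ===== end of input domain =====

-- B replaces A's two sequential splits, in-plus-split operator loop and three-pass strip/lower/replace
-- pipeline with a single char scan, a find-then-slice priority loop and one fused per-char translation
-- (objective: alternative decomposition, same exact result).

-- ===== PORT A =====
-- for token in ("==", …): if token in spec: spec = spec.split(token, 1)[0]; break
def opLoopA : List String → String → String
  | [], s => s
  | t :: ts, s =>
    if PySem.Str.isIn t s then
      (PySem.List.pyGet? ((PySem.Str.splitMax? s t 1).getD []) 0).getD ""
    else opLoopA ts s

def canonical_name (spec : String) : String :=
  let s1 := (PySem.List.pyGet? ((PySem.Str.splitMax? spec ";" 1).getD []) 0).getD ""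
  let s2 := (PySem.List.pyGet? ((PySem.Str.splitMax? s1 "[" 1).getD []) 0).getD ""
  let s3 := opLoopA ["==", "!=", ">=", "<=", "~=", ">", "<"] s2
  PySem.Str.replace (PySem.Str.lower (PySem.Str.strip s3)) "-" "_"

-- ===== PORT B =====
-- for c in spec: if c in ";[": break; name.append(c)
def scanCutB : List Char → List Char
  | [] => []
  | c :: r => if c == ';' || c == '[' then [] else c :: scanCutB r

-- cut = len(s); for t in (…): p = s.find(t); if p != -1: cut = p; break
def opCutB : List String → List Char → Int
  | [], s => (s.length : Int)
  | t :: ts, s =>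
    let p := PySem.Chars.find s t.toList
    if p != -1 then p else opCutB ts s

def canonical_name_alt (spec : String) : String :=
  let s1 := scanCutB spec.toList
  let cut := opCutB ["==", "!=", ">=", "<=", "~=", ">", "<"] s1
  let s2 := PySem.Chars.strip (PySem.Chars.slice s1 none (some cut))
  String.ofList (s2.map (fun c => if c == '-' then '_' else PySem.Chars.lowerChar c))

-- ===== PRECONDITION & SPEC =====
def Spec_canonical_name (spec : String) (out : String) : Prop := out = canonical_name_alt spec
instance (spec : String) (out : String) : Decidable (Spec_canonical_name spec out) := by unfold Spec_canonical_name; infer_instance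

-- ===== CLAIM (what is proved, stated in full; the proofs are below) =====
def Claim_equal_canonical_name : Prop := ∀ (spec : String), Dom_canonical_name spec → Spec_canonical_name spec (canonical_name spec)

-- ===== LEMMAS AND PROOFS =====

-- prefix of s strictly before the first occurrence of sep (the whole s if sep does not occur)
def preOf (sep : List Char) : List Char → List Char
  | [] => []
  | c :: r => if sep.isPrefixOf (c :: r) then [] else c :: preOf sep r

-- first occurrence position of sep in s, as an Option Nat
def ffind (sep : List Char) : List Char → Option Nat
  | [] => if sep.isEmpty then some 0 else none
  | c :: r => if sep.isPrefixOf (c :: r) then some 0 else (ffind sep r).map (· + 1)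

theorem headD_rev (y x : List Char) (accr : List (List Char)) :
    ((y :: (accr ++ [x])).reverse).headD [] = x := by
  simp [List.reverse_cons, List.reverse_append]

theorem go_acc_head (sep : List Char) :
    ∀ (fuel m : Nat) (s cur : List Char) (accr : List (List Char)) (x : List Char),
      (PySem.Chars.splitOnMax.go sep fuel m s cur (accr ++ [x])).headD [] = x := by
  intro fuel
  induction fuel with
  | zero =>
    intro m s cur accr x
    simp only [PySem.Chars.splitOnMax.go]
    exact headD_rev _ _ _
  | succ n ih =>
    intro m s cur accr x
    cases s with
    | nil =>
      simp only [PySem.Chars.splitOnMax.go]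
      exact headD_rev _ _ _
    | cons c rest =>
      simp only [PySem.Chars.splitOnMax.go]
      by_cases hm : m = 0
      · subst hm
        rw [if_pos rfl]
        exact headD_rev _ _ _
      · rw [if_neg hm]
        by_cases hp : sep.isPrefixOf (c :: rest) = true
        · rw [if_pos hp]
          have := ih (m - 1) (List.drop sep.length (c :: rest)) [] (cur.reverse :: accr) x
          simpa using this
        · rw [if_neg hp]
          exact ih m rest (c :: cur) accr x

theorem go_empty_head (sep : List Char) :
    ∀ (fuel : Nat) (s cur : List Char), s.length < fuel →
      (PySem.Chars.splitOnMax.go sep fuel 1 s cur []).headD [] = cur.reverse ++ preOf sep s := by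
  intro fuel
  induction fuel with
  | zero => intro s cur h; omega
  | succ n ih =>
    intro s cur h
    cases s with
    | nil => simp [PySem.Chars.splitOnMax.go, preOf]
    | cons c rest =>
      simp only [PySem.Chars.splitOnMax.go]
      rw [if_neg one_ne_zero]
      by_cases hp : sep.isPrefixOf (c :: rest) = true
      · rw [if_pos hp]
        have := go_acc_head sep n 0 (List.drop sep.length (c :: rest)) [] [] cur.reverse
        simp only [List.nil_append] at this
        rw [this]
        simp [preOf, hp]
      · rw [if_neg hp]
        have hlen : rest.length < n := by simp at h; omega
        rw [ih rest (c :: cur) hlen]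
        simp [preOf, hp, List.reverse_cons]

theorem splitOnMax_one_head (sep cs : List Char) :
    (PySem.Chars.splitOnMax cs sep 1).headD [] = preOf sep cs := by
  unfold PySem.Chars.splitOnMax
  rw [if_neg (by norm_num)]
  have := go_empty_head sep (cs.length + 1) cs [] (by omega)
  simpa using this

theorem head_toList (L : List String) :
    ((PySem.List.pyGet? L 0).getD "").toList = (L.map String.toList).headD [] := by
  cases L <;> simp [PySem.List.pyGet?, PySem.List.pyIdx?]

theorem strSplitHead (s sep : String) (h : sep.toList ≠ []) :
    ((PySem.List.pyGet? ((PySem.Str.splitMax? s sep 1).getD []) 0).getD "").toList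
      = preOf sep.toList s.toList := by
  have hmap := PySem.Str.splitMax?_map s sep 1
  have hsome : PySem.Chars.splitMax? s.toList sep.toList 1
      = some (PySem.Chars.splitOnMax s.toList sep.toList 1) := by
    unfold PySem.Chars.splitMax?
    rw [if_neg (by simpa [List.isEmpty_iff] using h)]
  rw [hsome] at hmap
  cases hL : PySem.Str.splitMax? s sep 1 with
  | none => rw [hL] at hmap; simp at hmap
  | some L =>
    rw [hL] at hmap
    simp only [Option.map_some, Option.some.injEq] at hmap
    simp only [Option.getD_some]
    rw [head_toList, hmap, splitOnMax_one_head]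

theorem findgo_eq (sub : List Char) :
    ∀ (s : List Char) (k : Nat),
      PySem.Chars.find.go sub s k
        = match ffind sub s with
          | some d => ((k + d : Nat) : Int)
          | none => -1 := by
  intro s
  induction s with
  | nil =>
    intro k
    simp only [PySem.Chars.find.go, ffind]
    by_cases he : sub.isEmpty = true <;> simp [he]
  | cons c r ih =>
    intro k
    simp only [PySem.Chars.find.go, ffind]
    by_cases hp : sub.isPrefixOf (c :: r) = true
    · simp [hp]
    · simp only [hp, Bool.false_eq_true, if_false]
      rw [ih (k + 1)]
      cases hf : ffind sub r with
      | none => simp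
      | some d =>
        simp only [Option.map_some]
        push_cast
        ring

theorem pre_ffind (sub : List Char) (hs : sub ≠ []) :
    ∀ (s : List Char),
      preOf sub s
        = match ffind sub s with
          | some d => s.take d
          | none => s := by
  intro s
  induction s with
  | nil =>
    simp [preOf, ffind, List.isEmpty_iff, hs]
  | cons c r ih =>
    simp only [preOf, ffind]
    by_cases hp : sub.isPrefixOf (c :: r) = true
    · simp [hp]
    · simp only [hp, Bool.false_eq_true, if_false]
      rw [ih]
      cases hf : ffind sub r with
      | none => simp
      | some d => simp

theorem opStage (toks : List String) (s : String) (h : ∀ t ∈ toks, t.toList ≠ []) :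
    (opLoopA toks s).toList
      = PySem.Chars.slice s.toList none (some (opCutB toks s.toList)) := by
  induction toks with
  | nil =>
    simp only [opLoopA, opCutB]
    rw [PySem.Chars.slice_eq_listSlice,
        PySem.List.slice_to _ (Int.natCast_nonneg _)]
    simp
  | cons t ts ih =>
    have ht : t.toList ≠ [] := h t (by simp)
    simp only [opLoopA, opCutB]
    have hfind : PySem.Chars.find s.toList t.toList
        = match ffind t.toList s.toList with
          | some d => ((d : Nat) : Int)
          | none => -1 := by
      unfold PySem.Chars.find
      rw [findgo_eq]
      cases ffind t.toList s.toList <;> simp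
    have hisin : PySem.Str.isIn t s = (PySem.Chars.find s.toList t.toList != -1) := by
      rw [PySem.Str.isIn_eq]
      unfold PySem.Chars.isIn
      rfl
    cases hf : ffind t.toList s.toList with
    | none =>
      have hfi : PySem.Chars.find s.toList t.toList = -1 := by rw [hfind, hf]
      rw [hisin, hfi]
      simp only [bne_self_eq_false, if_false, Bool.false_eq_true]
      rw [ih (fun t ht => h t (by simp [ht]))]
    | some d =>
      have hfi : PySem.Chars.find s.toList t.toList = (d : Int) := by rw [hfind, hf]
      have hne : ((d : Int) != -1) = true := by simp
      rw [hisin, hfi]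
      simp only [hne, if_true]
      rw [strSplitHead s t ht, pre_ffind t.toList ht, hf]
      rw [PySem.Chars.slice_eq_listSlice, PySem.List.slice_to _ (Int.natCast_nonneg _)]
      simp

theorem preOf_single_cons (a c : Char) (r : List Char) :
    preOf [a] (c :: r) = if a = c then [] else c :: preOf [a] r := by
  have hpre : [a].isPrefixOf (c :: r) = (a == c) := by simp [List.isPrefixOf]
  simp only [preOf, hpre]
  by_cases h : a = c <;> simp [h]

theorem stage1_eq : ∀ (cs : List Char), preOf ['['] (preOf [';'] cs) = scanCutB cs := by
  intro cs
  induction cs with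
  | nil => simp [preOf, scanCutB]
  | cons c r ih =>
    rw [preOf_single_cons]
    by_cases h1 : ';' = c
    · rw [if_pos h1]
      simp [preOf, scanCutB, ← h1]
    · rw [if_neg h1, preOf_single_cons]
      by_cases h2 : '[' = c
      · rw [if_pos h2]
        simp [scanCutB, ← h2]
      · rw [if_neg h2]
        have hc : (c == ';' || c == '[') = false := by
          simp only [Bool.or_eq_false_iff, beq_eq_false_iff_ne, ne_eq]
          exact ⟨fun h => h1 h.symm, fun h => h2 h.symm⟩
        simp only [scanCutB, hc, Bool.false_eq_true, if_false]
        rw [ih]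

theorem replace_go_single (a b : Char) :
    ∀ (fuel : Nat) (y acc : List Char), y.length ≤ fuel →
      PySem.Chars.replace.go [a] [b] fuel y acc
        = acc.reverse ++ y.map (fun c => if c == a then b else c) := by
  intro fuel
  induction fuel with
  | zero =>
    intro y acc h
    have : y = [] := by cases y <;> simp_all
    subst this
    simp [PySem.Chars.replace.go]
  | succ n ih =>
    intro y acc h
    cases y with
    | nil => simp [PySem.Chars.replace.go]
    | cons c t =>
      simp only [PySem.Chars.replace.go]
      by_cases hp : [a].isPrefixOf (c :: t) = true
      · have hac : a = c := by simpa [List.isPrefixOf] using hp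
        simp only [hp, if_true]
        rw [ih _ _ (by simp at h ⊢; omega)]
        subst hac
        simp
      · have hac : ¬ a = c := by simpa [List.isPrefixOf] using hp
        rw [if_neg hp]
        rw [ih t (c :: acc) (by simp at h ⊢; omega)]
        have hca : ¬ c = a := fun h' => hac h'.symm
        simp [hca, List.reverse_cons]

theorem replace_single (a b : Char) (y : List Char) :
    PySem.Chars.replace y [a] [b] = y.map (fun c => if c == a then b else c) := by
  unfold PySem.Chars.replace
  rw [if_neg (by simp)]
  simpa using replace_go_single a b y.length y [] (le_refl _)

theorem lower_dash (c : Char) :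
    (if PySem.Chars.lowerChar c == '-' then '_' else PySem.Chars.lowerChar c)
      = (if c == '-' then '_' else PySem.Chars.lowerChar c) := by
  unfold PySem.Chars.lowerChar PySem.Chars.isupper
  by_cases hu : ('A' ≤ c ∧ c ≤ 'Z')
  · have h1 : 65 ≤ c.toNat ∧ c.toNat ≤ 90 := ⟨hu.1, hu.2⟩
    have hval : (c.toNat + 32).isValidChar := by left; omega
    have htn : (Char.ofNat (c.toNat + 32)).toNat = c.toNat + 32 := by
      rw [Char.ofNat, dif_pos hval]
      rfl
    have hdash : ('-').toNat = 45 := by decide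
    have hne : (Char.ofNat (c.toNat + 32) == '-') = false := by
      simp only [beq_eq_false_iff_ne, ne_eq]
      intro hEq
      have h' := congrArg Char.toNat hEq
      rw [htn, hdash] at h'
      omega
    have hcd : (c == '-') = false := by
      simp only [beq_eq_false_iff_ne, ne_eq]
      intro hEq
      have h' := congrArg Char.toNat hEq
      rw [hdash] at h'
      omega
    simp only [hu.1, hu.2, decide_true, Bool.and_self, if_true, hne, hcd,
      Bool.false_eq_true, if_false]
  · have hb : (decide ('A' ≤ c) && decide (c ≤ 'Z')) = false := by
      rcases not_and_or.mp hu with h | h <;> simp [h]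
    rw [hb]
    simp

theorem final_stage (y : List Char) :
    PySem.Chars.replace (PySem.Chars.lower y) ['-'] ['_']
      = y.map (fun c => if c == '-' then '_' else PySem.Chars.lowerChar c) := by
  rw [replace_single]
  unfold PySem.Chars.lower
  rw [List.map_map]
  apply List.map_congr_left
  intro c _
  simpa using lower_dash c

-- ===== VERDICT (by name: the statement is the Claim_ definition above) =====
theorem canonical_name_spec : Claim_equal_canonical_name := by
  intro spec _
  unfold Spec_canonical_name canonical_name canonical_name_alt
  apply String.toList_inj.mp
  rw [PySem.Str.toList_replace, PySem.Str.toList_lower, PySem.Str.toList_strip,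
      String.toList_ofList]
  rw [opStage _ _ (by decide)]
  rw [strSplitHead _ "[" (by decide), strSplitHead _ ";" (by decide)]
  simp only [show (";" : String).toList = [';'] from by decide,
    show ("[" : String).toList = ['['] from by decide,
    show ("_" : String).toList = ['_'] from by decide]
  rw [stage1_eq, final_stage, String.toList_ofList]
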